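-- pv_equiv track=rewrite | github.com/jjpterdh/algorithm | week6/defense_game.py | solution
-- ===== SOURCE A (Python) =====
-- def solution(n, k, enemy):
--
--     answer=0
--
--     if len(enemy) < k:
--         return len(enemy)
--
--     max_num = []
--     for i in range(len(enemy)):
--         if n < enemy[i] and k > 0: # n이 작고 무적권이 남아 있을 때
--             max_num.append(enemy[i])
--             max_num.sort(reverse=True)
--             k-=1
--             n+=max_num.pop(0)
--             answer=i
--
--             if n < enemy[i]:
--                 break
--             else:
--                 n-=enemy[i]
--
--         elif n < enemy[i]: # n이 작고 무적권이 없을 때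
--             break
--
--         else:
--             max_num.append(enemy[i])
--             max_num.sort(reverse=True)
--             answer=i
--             n-=enemy[i]
--
--
--     return answer+1
-- ===== SOURCE B (Python) =====
-- def _meld(a, b):
--     # meld of two max skew heaps; a node is (value, left, right), the empty heap is None
--     if a is None:
--         return b
--     if b is None:
--         return a
--     if b[0] <= a[0]:
--         return (a[0], _meld(a[2], b), a[1])
--     return (b[0], _meld(b[2], a), b[1])
--
--
-- def solution(n, k, enemy):
--     if len(enemy) < k:
--         return len(enemy)
--     heap = None          # max skew heap of the enemies defeated so far
--     answer = 0
--     for i, e in enumerate(enemy):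
--         if e <= n:
--             heap = _meld(heap, (e, None, None))
--             answer = i
--             n -= e
--         elif k > 0:
--             heap = _meld(heap, (e, None, None))
--             top, l, r = heap
--             heap = _meld(l, r)     # delete-max in O(log) amortized
--             k -= 1
--             n += top
--             answer = i
--             if n < e:
--                 break
--             n -= e
--         else:
--             break
--     return answer + 1
-- ===== Notes on version B (the rewrite author's own statement) =====
-- stated objective: faster
-- what changed: B replaces A's flat list that is appended to and fully re-sorted (then pop(0)) on every iteration by a linked max skew heap: O(1)-amortized-log meld for insert and delete-max, no sorting anywhere; the loop is also restated pay-first.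
import Mathlib
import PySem

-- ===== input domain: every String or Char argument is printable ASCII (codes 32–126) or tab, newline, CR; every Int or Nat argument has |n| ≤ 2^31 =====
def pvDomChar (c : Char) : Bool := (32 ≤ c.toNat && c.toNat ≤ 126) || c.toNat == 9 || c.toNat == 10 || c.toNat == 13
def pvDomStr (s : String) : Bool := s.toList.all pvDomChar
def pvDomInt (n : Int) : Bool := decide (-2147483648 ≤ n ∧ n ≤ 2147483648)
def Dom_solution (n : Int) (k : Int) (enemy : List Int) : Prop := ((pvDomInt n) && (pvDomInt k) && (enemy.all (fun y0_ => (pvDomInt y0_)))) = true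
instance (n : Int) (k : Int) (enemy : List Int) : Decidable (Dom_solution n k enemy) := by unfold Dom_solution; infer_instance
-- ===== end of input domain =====

-- B replaces A's per-iteration append + sort(reverse=True) + pop(0) on a flat list by a
-- linked max skew heap (meld-based insert and delete-max, no sorting) — objective: faster.


-- ===== PORT A =====
-- the for-loop with break; state (n, k, answer, max_num), current index i
def solutionGoA : List Int → Int → Int → Int → List Int → Int → Int
  | [], _, _, answer, _, _ => answer + 1
  | e :: rest, n, k, answer, maxNum, i =>
    if n < e ∧ 0 < k then
      -- max_num.append(enemy[i]); max_num.sort(reverse=True); k-=1; n+=max_num.pop(0); answer=i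
      let m := PySem.List.sorted (maxNum ++ [e]) (fun x => x) true
      match PySem.List.pop? m 0 with
      | some (top, m') =>
          let n' := n + top
          let answer' := i
          if n' < e then answer' + 1                     -- break
          else solutionGoA rest (n' - e) (k - 1) answer' m' (i + 1)
      | none => answer + 1                               -- unreachable: m is nonempty
    else if n < e then answer + 1                        -- break
    else
      solutionGoA rest (n - e) k i (PySem.List.sorted (maxNum ++ [e]) (fun x => x) true) (i + 1)

def solution (n : Int) (k : Int) (enemy : List Int) : Int :=
  if (enemy.length : Int) < k then (enemy.length : Int)
  else solutionGoA enemy n k 0 [] 0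

-- ===== PORT B =====
-- Source B's node tuples (value, left, right) / None become an inductive binary tree
inductive SHeap where
  | nil : SHeap
  | node : Int → SHeap → SHeap → SHeap
deriving DecidableEq, Repr

-- Source B's _meld, branch for branch (skew-heap meld: larger root wins, children swapped)
def SHeap.meld : SHeap → SHeap → SHeap
  | .nil, b => b
  | a, .nil => a
  | .node av al ar, .node bv bl br =>
    if bv ≤ av then .node av (SHeap.meld ar (.node bv bl br)) al
    else .node bv (SHeap.meld br (.node av al ar)) bl
  termination_by a b => sizeOf a + sizeOf b

def solutionGoB : List Int → Int → Int → Int → SHeap → Int → Int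
  | [], _, _, answer, _, _ => answer + 1
  | e :: rest, n, k, answer, heap, i =>
    if e ≤ n then
      solutionGoB rest (n - e) k i (SHeap.meld heap (.node e .nil .nil)) (i + 1)
    else if 0 < k then
      match SHeap.meld heap (.node e .nil .nil) with
      | .node top l r =>
          let n' := n + top
          if n' < e then i + 1                           -- break
          else solutionGoB rest (n' - e) (k - 1) i (SHeap.meld l r) (i + 1)
      | .nil => answer + 1                               -- unreachable: meld with a node is a node
    else answer + 1                                      -- break

def solution_alt (n : Int) (k : Int) (enemy : List Int) : Int :=
  if (enemy.length : Int) < k then (enemy.length : Int)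
  else solutionGoB enemy n k 0 .nil 0

-- ===== PRECONDITION & SPEC =====
def Spec_solution (n : Int) (k : Int) (enemy : List Int) (out : Int) : Prop := out = solution_alt n k enemy
instance (n : Int) (k : Int) (enemy : List Int) (out : Int) : Decidable (Spec_solution n k enemy out) := by unfold Spec_solution; infer_instance

-- ===== CLAIM =====
def Claim_equal_solution : Prop := ∀ (n : Int) (k : Int) (enemy : List Int), Dom_solution n k enemy → Spec_solution n k enemy (solution n k enemy)

-- ===== LEMMAS AND PROOFS =====

def SHeap.toMul : SHeap → Multiset Int
  | .nil => 0
  | .node a l r => a ::ₘ (l.toMul + r.toMul)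

def SHeap.IsHeap : SHeap → Prop
  | .nil => True
  | .node a l r => (∀ x ∈ l.toMul, x ≤ a) ∧ (∀ x ∈ r.toMul, x ≤ a) ∧ l.IsHeap ∧ r.IsHeap

lemma meld_toMul (a b : SHeap) : (SHeap.meld a b).toMul = a.toMul + b.toMul := by
  induction a, b using SHeap.meld.induct with
  | case1 b => simp [SHeap.meld, SHeap.toMul]
  | case2 a h => cases a <;> simp [SHeap.meld, SHeap.toMul]
  | case3 av al ar bv bl br h ih =>
      simp only [SHeap.meld, if_pos h, SHeap.toMul, ih, ← Multiset.singleton_add]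
      abel
  | case4 av al ar bv bl br h ih =>
      simp only [SHeap.meld, if_neg h, SHeap.toMul, ih, ← Multiset.singleton_add]
      abel

lemma le_root {v : Int} {l r : SHeap} (h : (SHeap.node v l r).IsHeap) :
    ∀ x ∈ (SHeap.node v l r).toMul, x ≤ v := by
  obtain ⟨hl, hr, _, _⟩ := h
  intro x hx
  simp only [SHeap.toMul, Multiset.mem_cons, Multiset.mem_add] at hx
  rcases hx with rfl | hx | hx
  · exact le_refl x
  · exact hl x hx
  · exact hr x hx

lemma meld_isHeap (a b : SHeap) : a.IsHeap → b.IsHeap → (SHeap.meld a b).IsHeap := by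
  induction a, b using SHeap.meld.induct with
  | case1 b => intro _ hb; simpa [SHeap.meld] using hb
  | case2 a h => intro ha _; cases a <;> simpa [SHeap.meld] using ha
  | case3 av al ar bv bl br h ih =>
      intro ha hb
      obtain ⟨hal, har, hhal, hhar⟩ := ha
      simp only [SHeap.meld, if_pos h]
      refine ⟨?_, hal, ih hhar hb, hhal⟩
      intro x hx
      rw [meld_toMul] at hx
      rcases Multiset.mem_add.1 hx with hx | hx
      · exact har x hx
      · exact le_trans (le_root hb x hx) h
  | case4 av al ar bv bl br h ih =>
      intro ha hb
      obtain ⟨hbl, hbr, hhbl, hhbr⟩ := hb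
      simp only [SHeap.meld, if_neg h]
      refine ⟨?_, hbl, ih hhbr ha, hhbl⟩
      intro x hx
      rw [meld_toMul] at hx
      rcases Multiset.mem_add.1 hx with hx | hx
      · exact hbr x hx
      · exact le_trans (le_root ha x hx) (not_le.1 h).le

lemma go_eq (rest : List Int) : ∀ (n k answer i : Int) (L : List Int) (H : SHeap),
    (L : Multiset Int) = H.toMul → H.IsHeap →
    solutionGoA rest n k answer L i = solutionGoB rest n k answer H i := by
  induction rest with
  | nil => intro n k answer i L H _ _; rfl
  | cons e rest ih =>
    intro n k answer i L H hm hh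
    -- the common melded heap and sorted list
    set H' := SHeap.meld H (.node e .nil .nil) with hH'
    have hh' : H'.IsHeap := meld_isHeap _ _ hh (by exact ⟨by simp [SHeap.toMul], by simp [SHeap.toMul], trivial, trivial⟩)
    have hmul' : ((L ++ [e] : List Int) : Multiset Int) = H'.toMul := by
      have h9 : (SHeap.node e .nil .nil).toMul = {e} := by simp [SHeap.toMul]
      rw [hH', meld_toMul, ← hm, h9, ← Multiset.coe_singleton, ← Multiset.coe_add]
    have hperm : (PySem.List.sorted (L ++ [e]) (fun x => x) true).Perm (L ++ [e]) :=
      PySem.List.sorted_perm _ _ _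
    have hsmul : ((PySem.List.sorted (L ++ [e]) (fun x => x) true : List Int) : Multiset Int) = H'.toMul := by
      rw [Multiset.coe_eq_coe.2 hperm]; exact hmul'
    by_cases h1 : n < e
    · by_cases h2 : 0 < k
      · -- both use the shield: A pops the head of the descending sort, B the heap root
        rcases hs : PySem.List.sorted (L ++ [e]) (fun x => x) true with _ | ⟨h0, t⟩
        · exfalso
          have := (PySem.List.sorted_eq_nil_iff (L ++ [e]) (fun x => x) true).1 hs
          simp at this
        rcases hn : H' with _ | ⟨top, l, r⟩
        · exfalso
          rw [hs, hn] at hsmul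
          simp [SHeap.toMul] at hsmul
        have heq : h0 = top := by
          have h0mem : h0 ∈ H'.toMul := by
            rw [← hsmul, hs]; simp
          have topmem : top ∈ ((L ++ [e] : List Int) : Multiset Int) := by
            rw [hmul', hn]; simp [SHeap.toMul]
          have h0le : h0 ≤ top := by rw [hn] at h0mem; exact le_root (hn ▸ hh') h0 h0mem
          have tople : top ≤ h0 :=
            PySem.List.key_head_sorted_rev_ge (L ++ [e]) (fun x => x) hs top (by simpa using topmem)
          omega
        have htail : ((t : List Int) : Multiset Int) = (SHeap.meld l r).toMul := by
          have : h0 ::ₘ (t : Multiset Int) = top ::ₘ (SHeap.meld l r).toMul := by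
            rw [meld_toMul]
            have := hsmul; rw [hs, hn] at this
            simpa [SHeap.toMul] using this
          rw [heq] at this
          exact (Multiset.cons_inj_right top).1 this
        have hheap_lr : (SHeap.meld l r).IsHeap := by
          rw [hn] at hh'
          exact meld_isHeap _ _ hh'.2.2.1 hh'.2.2.2
        simp only [solutionGoA, solutionGoB, if_pos (And.intro h1 h2),
          if_neg (show ¬ e ≤ n by omega), if_pos h2, hs, PySem.List.pop?_zero_cons, ← hH', hn]
        rw [heq]
        by_cases h3 : n + top < e
        · simp [h3]
        · simp only [if_neg h3]
          exact ih (n + top - e) (k - 1) i (i + 1) t (SHeap.meld l r) htail hheap_lr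
      · simp only [solutionGoA, solutionGoB,
          if_neg (by tauto : ¬ (n < e ∧ 0 < k)), if_pos h1,
          if_neg (show ¬ e ≤ n by omega), if_neg h2]
    · simp only [solutionGoA, solutionGoB,
        if_neg (by tauto : ¬ (n < e ∧ 0 < k)), if_neg h1,
        if_pos (show e ≤ n by omega)]
      exact ih (n - e) k i (i + 1) _ _ hsmul hh'

-- ===== VERDICT =====
theorem solution_spec : Claim_equal_solution := by
  intro n k enemy _
  unfold Spec_solution solution solution_alt
  split
  · rfl
  · exact go_eq enemy n k 0 0 [] .nil (by simp [SHeap.toMul]) trivial
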